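-- pv_equiv track=rewrite | github.com/Ermike98/Kira | gui/components/step_editor.py | _match_args
-- ===== SOURCE A (Python) =====
-- from typing import Optional, List, Tuple, TYPE_CHECKING
--
-- def _match_args(
--     arg_strs: List[str],
--     param_names: List[str],
--     param_defaults: dict
-- ) -> List[str]:
--     """Align provided argument strings to parameter names."""
--     values: List[str] = []
--     for i, name in enumerate(param_names):
--         if i < len(arg_strs):
--             values.append(arg_strs[i])
--         elif name in param_defaults:
--             values.append("")  # leave blank to use default
--         else:
--             values.append("")
--     return values
-- ===== SOURCE B (Python) =====
-- def _match_args(arg_strs, param_names, param_defaults):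
--     n = len(param_names)
--     return arg_strs[:n] + [""] * max(0, n - len(arg_strs))
-- ===== Notes on version B (the rewrite author's own statement) =====
-- stated objective: simpler
-- what changed: Replaced the index loop with three branches by the closed-form slice-and-pad arg_strs[:n] + ['']*max(0, n-len(arg_strs)), exploiting that both non-index branches yield '' and param_defaults is never consulted for the output.
import Mathlib
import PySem

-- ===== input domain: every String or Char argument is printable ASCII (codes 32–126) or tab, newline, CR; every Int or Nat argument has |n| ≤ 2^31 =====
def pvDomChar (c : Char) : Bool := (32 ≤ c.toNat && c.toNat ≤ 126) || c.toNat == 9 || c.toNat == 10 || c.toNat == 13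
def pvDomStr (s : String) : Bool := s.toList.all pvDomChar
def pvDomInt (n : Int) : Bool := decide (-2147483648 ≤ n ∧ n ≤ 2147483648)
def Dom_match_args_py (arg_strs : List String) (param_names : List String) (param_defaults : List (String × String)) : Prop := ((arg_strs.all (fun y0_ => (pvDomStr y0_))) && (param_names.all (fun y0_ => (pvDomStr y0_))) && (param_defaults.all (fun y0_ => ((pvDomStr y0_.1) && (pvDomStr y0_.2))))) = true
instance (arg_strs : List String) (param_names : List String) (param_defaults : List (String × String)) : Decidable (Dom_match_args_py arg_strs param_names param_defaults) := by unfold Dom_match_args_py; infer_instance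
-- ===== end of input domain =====

-- ===== PORT A =====
-- Header: B replaces A's per-parameter loop (whose elif/else branches both append "") by the
-- closed-form slice-and-pad arg_strs[:n] ++ [""]*max(0, n-len(arg_strs)); objective: simpler.
def match_args_py (arg_strs : List String) (param_names : List String) (param_defaults : List (String × String)) : List String :=
  (PySem.List.enumerate param_names).foldl (fun values iname =>
    if iname.1 < (arg_strs.length : Int) then
      values ++ [(PySem.List.pyGet? arg_strs iname.1).getD ""]
    else if param_defaults.any (fun kv => kv.1 == iname.2) then
      values ++ [""]  -- leave blank to use default
    else
      values ++ [""]) []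

-- ===== PORT B =====
def match_args_py_alt (arg_strs : List String) (param_names : List String) (param_defaults : List (String × String)) : List String :=
  let n := param_names.length
  arg_strs.take n ++ List.replicate (n - arg_strs.length) ""

-- ===== PRECONDITION & SPEC =====
def Spec_match_args_py (arg_strs : List String) (param_names : List String) (param_defaults : List (String × String)) (out : List String) : Prop := out = match_args_py_alt arg_strs param_names param_defaults
instance (arg_strs : List String) (param_names : List String) (param_defaults : List (String × String)) (out : List String) : Decidable (Spec_match_args_py arg_strs param_names param_defaults out) := by unfold Spec_match_args_py; infer_instance

-- ===== CLAIM (what is proved, stated in full; the proofs are below) =====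
def Claim_equal_match_args_py : Prop := ∀ (arg_strs : List String) (param_names : List String) (param_defaults : List (String × String)), Dom_match_args_py arg_strs param_names param_defaults → Spec_match_args_py arg_strs param_names param_defaults (match_args_py arg_strs param_names param_defaults)

-- ===== LEMMAS AND PROOFS =====

-- ===== VERDICT (by name: the statement is the Claim_ definition above) =====
-- foldl that only appends a singleton per element is the map
theorem foldl_append_singleton {α β : Type} (g : α → β) (l : List α) (acc : List β) :
    l.foldl (fun v x => v ++ [g x]) acc = acc ++ l.map g := by
  induction l generalizing acc with
  | nil => simp
  | cons x xs ih => simp [List.foldl, ih]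

theorem match_args_py_eq_map (arg_strs param_names : List String)
    (param_defaults : List (String × String)) :
    match_args_py arg_strs param_names param_defaults =
      (PySem.List.enumerate param_names).map (fun iname =>
        if iname.1 < (arg_strs.length : Int) then
          (PySem.List.pyGet? arg_strs iname.1).getD ""
        else "") := by
  unfold match_args_py
  rw [show (fun (values : List String) (iname : Int × String) =>
      if iname.1 < (arg_strs.length : Int) then
        values ++ [(PySem.List.pyGet? arg_strs iname.1).getD ""]
      else if param_defaults.any (fun kv => kv.1 == iname.2) then
        values ++ [""]
      else values ++ [""]) =
    (fun (values : List String) (iname : Int × String) =>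
      values ++ [if iname.1 < (arg_strs.length : Int) then
          (PySem.List.pyGet? arg_strs iname.1).getD "" else ""]) from by
    funext v x; by_cases h : x.1 < (arg_strs.length : Int) <;> simp [h]]
  rw [foldl_append_singleton]
  simp

theorem match_args_py_spec : Claim_equal_match_args_py := by
  intro a p d _
  unfold Spec_match_args_py match_args_py_alt
  rw [match_args_py_eq_map]
  apply List.ext_getElem
  · simp [PySem.List.length_enumerate]; omega
  · intro k hk1 hk2
    rw [List.getElem_map, PySem.List.getElem_enumerate]
    simp only [zero_add]
    by_cases h : k < a.length
    · have hlt : ((k : Int)) < (a.length : Int) := by exact_mod_cast h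
      rw [if_pos hlt]
      rw [PySem.List.pyGet?_natCast]
      rw [List.getElem?_eq_getElem h]
      have hk' : k < (a.take p.length).length := by
        simp [PySem.List.length_enumerate] at hk1
        simp; omega
      rw [List.getElem_append_left hk']
      simp [Option.getD]
    · have hge : ¬ ((k : Int) < (a.length : Int)) := by
        intro hc; exact h (by exact_mod_cast hc)
      rw [if_neg hge]
      have hk' : (a.take p.length).length ≤ k := by simp; omega
      rw [List.getElem_append_right hk']
      simp
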